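-- pv_equiv track=rewrite | github.com/HiracharleFranklin/AI-Practices | Breast Cancer Classification Based on K-Means/P1.zitaik2.py | check_converge
-- ===== SOURCE A (Python) =====
-- def check_converge(clusters1, clusters2):
--     for i in clusters1.keys():
--         match_flag = 0
--         for j in clusters2.keys():
--             if (match_flag == 1):
--                 break;
--             cluster1 = clusters1[i]
--             cluster2 = clusters2[j]
--             if (len(cluster1)!=len(cluster2)):
--                 continue
--             unmatch_flag1 = 0
--             for m in cluster1:
--                 if m not in cluster2:
--                     unmatch_flag1 = 1
--                     break
--             if (unmatch_flag1 == 1):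
--                 break
--             unmatch_flag2 = 0
--             for n in cluster2:
--                 if n not in cluster1:
--                     unmatch_flag2 = 1
--                     break
--             if (unmatch_flag2 == 1):
--                 break
--             match_flag = 1
--
--         if (match_flag == 0):
--             return -1
--
--     return 1
-- ===== SOURCE B (Python) =====
-- def check_converge(clusters1, clusters2):
--     sets2 = [set(c) for c in clusters2.values()]
--     for c in clusters1.values():
--         if set(c) not in sets2:
--             return -1
--     return 1
-- ===== Notes on version B (the rewrite author's own statement) =====
-- stated objective: simpler
-- what changed: Replaces the nested flag-driven scans with mutual list-containment tests by precomputing the element sets of clusters2 once and doing a single set-membership pass over clusters1.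
-- intended difference: On inputs where every clusters1 cluster is set-equal to some clusters2 cluster but for some clusters1 cluster the FIRST equal-length clusters2 cluster is not set-equal to it, A's buggy break returns -1 while B returns 1, which is the intended answer since the partitions do match. — e.g. on check_converge([(0, [1, 2])], [(0, [1, 3]), (1, [1, 2])]): A returns -1, B returns 1
import Mathlib
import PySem

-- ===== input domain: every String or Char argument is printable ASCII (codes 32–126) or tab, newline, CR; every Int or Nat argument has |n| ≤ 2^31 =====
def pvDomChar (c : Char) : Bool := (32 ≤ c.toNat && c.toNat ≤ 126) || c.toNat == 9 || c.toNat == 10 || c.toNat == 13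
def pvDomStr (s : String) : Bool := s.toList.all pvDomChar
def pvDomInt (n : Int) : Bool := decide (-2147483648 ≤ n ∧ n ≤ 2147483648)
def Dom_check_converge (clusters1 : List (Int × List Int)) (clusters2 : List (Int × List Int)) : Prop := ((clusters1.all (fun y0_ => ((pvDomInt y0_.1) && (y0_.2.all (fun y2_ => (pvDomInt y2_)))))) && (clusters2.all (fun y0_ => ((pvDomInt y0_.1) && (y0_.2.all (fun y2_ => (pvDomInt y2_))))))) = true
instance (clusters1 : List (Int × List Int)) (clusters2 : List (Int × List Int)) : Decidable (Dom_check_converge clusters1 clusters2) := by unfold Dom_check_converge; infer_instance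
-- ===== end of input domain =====

-- B precomputes the element sets of clusters2 once and checks each clusters1 cluster by set
-- membership (simpler); where A's first-equal-length break misses a later match, B returns 1 (see D_).

-- ===== PORT A =====
-- inner 'for j in clusters2.keys()' loop: skips unequal lengths; on the first
-- equal-length cluster either breaks on a mismatch (false) or sets match_flag (true).
def pvInnerA (cluster1 : List Int) (cs2 : List (Int × List Int)) : Bool :=
  match cs2 with
  | [] => false
  | (_, cluster2) :: rest =>
    if cluster1.length ≠ cluster2.length then pvInnerA cluster1 rest
    else if cluster1.any (fun m => !(cluster2.contains m)) then false
    else if cluster2.any (fun n => !(cluster1.contains n)) then false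
    else true

def check_converge (clusters1 : List (Int × List Int)) (clusters2 : List (Int × List Int)) : Int :=
  match clusters1 with
  | [] => 1
  | (_, cluster1) :: rest =>
    if pvInnerA cluster1 clusters2 then check_converge rest clusters2 else -1

-- ===== PORT B =====
-- sets2 = [set(c) for c in clusters2.values()]; then one membership pass over clusters1
def pvScanB (sets2 : List (PySem.Set Int)) (cs1 : List (Int × List Int)) : Int :=
  match cs1 with
  | [] => 1
  | (_, c) :: rest =>
    if sets2.any (fun s => PySem.Set.equal s (PySem.Set.ofList c)) then pvScanB sets2 rest
    else -1

def check_converge_alt (clusters1 : List (Int × List Int)) (clusters2 : List (Int × List Int)) : Int :=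
  pvScanB (clusters2.map (fun p => PySem.Set.ofList p.2)) clusters1

-- ===== PRECONDITION & SPEC =====
-- mutual containment = set equality of the two lists' element sets
def pvSameElems (a b : List Int) : Bool := a.all (fun m => b.contains m) && b.all (fun n => a.contains n)

-- On inputs where every clusters1 cluster is set-equal to some clusters2 cluster but for some
-- clusters1 cluster the first equal-length clusters2 cluster is absent or not set-equal, A's
-- buggy break returns -1 while B returns 1, the intended answer since the partitions match.
def D_check_converge (clusters1 : List (Int × List Int)) (clusters2 : List (Int × List Int)) : Prop :=
  (clusters1.all (fun p => clusters2.any (fun q => pvSameElems p.2 q.2)) = true) ∧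
  (clusters1.any (fun p =>
      match clusters2.find? (fun q => q.2.length == p.2.length) with
      | none => true
      | some q => !pvSameElems p.2 q.2) = true)
instance (clusters1 : List (Int × List Int)) (clusters2 : List (Int × List Int)) : Decidable (D_check_converge clusters1 clusters2) := by unfold D_check_converge; infer_instance

def Spec_check_converge (clusters1 : List (Int × List Int)) (clusters2 : List (Int × List Int)) (out : Int) : Prop := ¬ D_check_converge clusters1 clusters2 → out = check_converge_alt clusters1 clusters2
instance (clusters1 : List (Int × List Int)) (clusters2 : List (Int × List Int)) (out : Int) : Decidable (Spec_check_converge clusters1 clusters2 out) := by unfold Spec_check_converge; infer_instance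

def pvDiffWitness_check_converge : (List (Int × List Int)) × (List (Int × List Int)) :=
  ([(0, [1, 2])], [(0, [1, 3]), (1, [1, 2])])
def pvDiffWitnessOut_check_converge : Int × Int := (-1, 1)

-- ===== CLAIM BLOCK =====
def Claim_unchanged_check_converge : Prop := ∀ (clusters1 : List (Int × List Int)) (clusters2 : List (Int × List Int)), Dom_check_converge clusters1 clusters2 → Spec_check_converge clusters1 clusters2 (check_converge clusters1 clusters2)
def Claim_changed_check_converge : Prop := Dom_check_converge (pvDiffWitness_check_converge.1) (pvDiffWitness_check_converge.2) ∧ D_check_converge (pvDiffWitness_check_converge.1) (pvDiffWitness_check_converge.2) ∧ check_converge (pvDiffWitness_check_converge.1) (pvDiffWitness_check_converge.2) = pvDiffWitnessOut_check_converge.1 ∧ check_converge_alt (pvDiffWitness_check_converge.1) (pvDiffWitness_check_converge.2) = pvDiffWitnessOut_check_converge.2 ∧ pvDiffWitnessOut_check_converge.1 ≠ pvDiffWitnessOut_check_converge.2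
def Claim_exact_check_converge : Prop := ∀ (clusters1 : List (Int × List Int)) (clusters2 : List (Int × List Int)), Dom_check_converge clusters1 clusters2 → D_check_converge clusters1 clusters2 → check_converge clusters1 clusters2 ≠ check_converge_alt clusters1 clusters2

-- ===== LEMMAS AND PROOFS =====

-- set equality of the element sets = mutual containment
theorem pv_equal_iff (c1 c2 : List Int) :
    PySem.Set.equal (PySem.Set.ofList c2) (PySem.Set.ofList c1) = pvSameElems c1 c2 := by
  rw [Bool.eq_iff_iff]
  unfold pvSameElems
  simp only [PySem.Set.equal, PySem.Set.issubset, PySem.Set.contains, Bool.and_eq_true,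
    List.all_eq_true]
  constructor
  · rintro ⟨h1, h2⟩
    refine ⟨fun m hm => ?_, fun n hn => ?_⟩
    · simpa [PySem.Set.mem_ofList] using h2 m (by simpa [PySem.Set.mem_ofList] using hm)
    · simpa [PySem.Set.mem_ofList] using h1 n (by simpa [PySem.Set.mem_ofList] using hn)
  · rintro ⟨h1, h2⟩
    refine ⟨fun n hn => ?_, fun m hm => ?_⟩
    · simpa [PySem.Set.mem_ofList] using h2 n (by simpa [PySem.Set.mem_ofList] using hn)
    · simpa [PySem.Set.mem_ofList] using h1 m (by simpa [PySem.Set.mem_ofList] using hm)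

-- A's inner loop = first equal-length cluster + mutual containment
theorem pv_inner_eq (c1 : List Int) (cs2 : List (Int × List Int)) :
    pvInnerA c1 cs2 =
      match cs2.find? (fun p => p.2.length == c1.length) with
      | none => false
      | some p => pvSameElems c1 p.2 := by
  induction cs2 with
  | nil => rfl
  | cons p rest ih =>
    simp only [pvInnerA]
    by_cases h : c1.length = p.2.length
    · rw [if_neg (by omega), List.find?_cons_of_pos (by simp [h])]
      unfold pvSameElems
      simp only [List.all_eq_not_any_not]
      cases h1 : c1.any (fun m => !(p.2.contains m)) <;>
        cases h2 : p.2.any (fun n => !(c1.contains n)) <;> simp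
    · rw [if_pos (by omega), List.find?_cons_of_neg (by simp; omega)]
      exact ih

-- A as an if over an all
theorem pv_A_eq (cs1 cs2 : List (Int × List Int)) :
    check_converge cs1 cs2 = if cs1.all (fun p => pvInnerA p.2 cs2) then 1 else -1 := by
  induction cs1 with
  | nil => rfl
  | cons q rest ih =>
    simp only [check_converge, List.all_cons, Bool.and_eq_true]
    cases h : pvInnerA q.2 cs2 <;> cases hr : rest.all (fun p => pvInnerA p.2 cs2) <;>
      simp [h, hr, ih]

-- B as an if over an all
theorem pv_B_eq (cs1 cs2 : List (Int × List Int)) :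
    check_converge_alt cs1 cs2 =
      if cs1.all (fun p => cs2.any (fun q => pvSameElems p.2 q.2)) then 1 else -1 := by
  unfold check_converge_alt
  induction cs1 with
  | nil => rfl
  | cons q rest ih =>
    simp only [pvScanB, List.all_cons, Bool.and_eq_true, List.any_map, Function.comp_def]
    have hmem : (cs2.any (fun p => PySem.Set.equal (PySem.Set.ofList p.2) (PySem.Set.ofList q.2)))
        = cs2.any (fun p => pvSameElems q.2 p.2) := by
      rw [Bool.eq_iff_iff]
      simp only [List.any_eq_true]
      constructor <;> rintro ⟨p, hp, h⟩ <;> exact ⟨p, hp, by rw [← pv_equal_iff q.2 p.2] at *; exact h⟩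
    rw [hmem]
    cases h : cs2.any (fun p => pvSameElems q.2 p.2) <;>
      cases hr : rest.all (fun p => cs2.any fun q => pvSameElems p.2 q.2) <;>
        simp [h, hr, ih]

-- pvInnerA true implies a set-equal cluster exists
theorem pv_inner_imp_any (c1 : List Int) (cs2 : List (Int × List Int))
    (h : pvInnerA c1 cs2 = true) : cs2.any (fun q => pvSameElems c1 q.2) = true := by
  rw [pv_inner_eq] at h
  cases hf : cs2.find? (fun p => p.2.length == c1.length) with
  | none => rw [hf] at h; exact absurd h (by simp)
  | some p =>
    rw [hf] at h
    exact List.any_of_mem (List.mem_of_find?_eq_some hf) h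

theorem pv_unchanged (cs1 cs2 : List (Int × List Int))
    (hnd : ¬ D_check_converge cs1 cs2) :
    check_converge cs1 cs2 = check_converge_alt cs1 cs2 := by
  rw [pv_A_eq, pv_B_eq]
  cases ha : cs1.all (fun p => pvInnerA p.2 cs2) with
  | true =>
    have hb : cs1.all (fun p => cs2.any (fun q => pvSameElems p.2 q.2)) = true := by
      rw [List.all_eq_true] at ha ⊢
      exact fun p hp => pv_inner_imp_any p.2 cs2 (ha p hp)
    simp [hb]
  | false =>
    cases hb : cs1.all (fun p => cs2.any (fun q => pvSameElems p.2 q.2)) with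
    | false => simp
    | true =>
      exfalso; apply hnd
      refine ⟨hb, ?_⟩
      rw [List.all_eq_false] at ha
      obtain ⟨p, hp, hfalse⟩ := ha
      rw [List.any_eq_true]
      refine ⟨p, hp, ?_⟩
      simp only [Bool.not_eq_true] at hfalse
      rw [pv_inner_eq] at hfalse
      cases hf : cs2.find? (fun q => q.2.length == p.2.length) with
      | none => simp [hf]
      | some q => rw [hf] at hfalse; simp [hf, hfalse]

theorem pv_exact (cs1 cs2 : List (Int × List Int))
    (hd : D_check_converge cs1 cs2) :
    check_converge cs1 cs2 ≠ check_converge_alt cs1 cs2 := by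
  obtain ⟨hb, hbad⟩ := hd
  rw [pv_A_eq, pv_B_eq, hb]
  have ha : cs1.all (fun p => pvInnerA p.2 cs2) = false := by
    rw [List.any_eq_true] at hbad
    obtain ⟨p, hp, hval⟩ := hbad
    rw [List.all_eq_false]
    refine ⟨p, hp, ?_⟩
    rw [Bool.not_eq_true, pv_inner_eq]
    cases hf : cs2.find? (fun q => q.2.length == p.2.length) with
    | none => simp
    | some q => rw [hf] at hval; simpa using hval
  rw [ha]
  decide

-- ===== VERDICT =====
theorem check_converge_spec : Claim_unchanged_check_converge := by
  intro cs1 cs2 _ hnd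
  exact pv_unchanged cs1 cs2 hnd

theorem check_converge_changed : Claim_changed_check_converge := by
  unfold Claim_changed_check_converge; decide

theorem check_converge_tight : Claim_exact_check_converge := by
  intro cs1 cs2 _ hd
  exact pv_exact cs1 cs2 hd
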